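-- pv_equiv track=rewrite | github.com/humancipher/Programming_Contest | Programming_Contest/AtCoder/ABC/ABC_200-299/ABC_200-209/ABC_200/ABC_200_B.py | solve
-- ===== SOURCE A (Python) =====
-- def solve(n,k):
--     if k == 0:
--         return n
--     else:
--         if n % 200 == 0:
--             n //= 200
--         else:
--             n = n * 1000 + 200
--         return solve(n,k-1)
-- ===== SOURCE B (Python) =====
-- def solve(n, k):
--     # Phase 1: peel leading divisions while n is a multiple of 200.
--     while k > 0 and n % 200 == 0:
--         n //= 200
--         k -= 1
--     # Phase 2: once n % 200 != 0, the steps alternate append/divide, and each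
--     # append-then-divide pair maps n to 5*n + 1 (n*1000+200 = 200*(5*n+1), and
--     # 5*n+1 is never a multiple of 200 since it is 1 mod 5).  So k//2 pairs
--     # collapse to the closed form n*5**m + (5**m - 1)//4, plus one trailing
--     # append if k is odd.
--     m = k // 2
--     p = 5 ** m
--     n = n * p + (p - 1) // 4
--     if k % 2 == 1:
--         n = n * 1000 + 200
--     return n
-- ===== Notes on version B (the rewrite author's own statement) =====
-- stated objective: faster
-- what changed: Replaced the k-step simulation by a two-phase computation: peel divisions while n % 200 == 0, then collapse the remaining alternating append/divide steps into the closed form n*5**m + (5**m-1)//4 with m = k//2 (pairs of steps act as n -> 5n+1).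
import Mathlib
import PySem

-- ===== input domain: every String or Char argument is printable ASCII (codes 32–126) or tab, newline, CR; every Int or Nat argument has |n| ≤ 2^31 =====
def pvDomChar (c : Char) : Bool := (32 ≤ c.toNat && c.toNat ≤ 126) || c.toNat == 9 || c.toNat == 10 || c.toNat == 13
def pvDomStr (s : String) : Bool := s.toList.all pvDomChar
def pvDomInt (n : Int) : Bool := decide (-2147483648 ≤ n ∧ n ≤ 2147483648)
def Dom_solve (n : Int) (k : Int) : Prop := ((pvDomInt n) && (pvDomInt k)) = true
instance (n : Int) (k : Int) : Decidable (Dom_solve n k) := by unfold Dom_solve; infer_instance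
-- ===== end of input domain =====

-- B replaces the k-step simulation by a two-phase computation: a divide-out phase
-- followed by a closed form for the alternating append/divide tail.

-- ===== PORT A =====
-- A's recursion decreases k by 1 each call; fuel = k.toNat only makes it total
-- (for k < 0 Python A recurses forever, excluded by Pre_solve).
def solveFuel (n : Int) (k : Int) : Nat → Int
  | 0 => n
  | fuel + 1 =>
    if k = 0 then n
    else if n % 200 = 0 then solveFuel (PySem.Int.floordiv n 200) (k - 1) fuel
    else solveFuel (n * 1000 + 200) (k - 1) fuel

def solve (n : Int) (k : Int) : Int :=
  if k = 0 then n else solveFuel n k k.toNat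

-- ===== PORT B =====
-- Phase 1 of Source B: while k > 0 and n % 200 == 0: n //= 200; k -= 1.
-- Fuel = initial k.toNat (the loop runs at most k times); exact for k ≥ 0 (Pre_).
def altDivide (n : Int) (k : Int) : Nat → Int × Int
  | 0 => (n, k)
  | fuel + 1 =>
    if 0 < k ∧ n % 200 = 0 then altDivide (PySem.Int.floordiv n 200) (k - 1) fuel
    else (n, k)

-- Phase 2 of Source B: m = k // 2; n = n*5**m + (5**m - 1)//4; append once if k odd.
-- '5 ** m' needs a Nat exponent in Lean: (k//2).toNat, exact since k ≥ 0 here (Pre_).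
def altFinish (p : Int × Int) : Int :=
  let m : Nat := (PySem.Int.floordiv p.2 2).toNat
  let pw : Int := 5 ^ m
  let n' := p.1 * pw + PySem.Int.floordiv (pw - 1) 4
  if PySem.Int.mod p.2 2 = 1 then n' * 1000 + 200 else n'

def solve_alt (n : Int) (k : Int) : Int := altFinish (altDivide n k k.toNat)

-- ===== PRECONDITION & SPEC =====
-- A recurses without a base case when k < 0 (RecursionError), so Pre_ requires 0 ≤ k.
def Pre_solve (n : Int) (k : Int) : Prop := 0 ≤ k
instance (n : Int) (k : Int) : Decidable (Pre_solve n k) := by unfold Pre_solve; infer_instance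
def pvWitness_solve : Int × Int := (407, 4)

def Spec_solve (n : Int) (k : Int) (out : Int) : Prop := out = solve_alt n k
instance (n : Int) (k : Int) (out : Int) : Decidable (Spec_solve n k out) := by unfold Spec_solve; infer_instance

-- ===== CLAIM (what is proved, stated in full; the proofs are below) =====
def Claim_equal_solve : Prop := ∀ (n : Int) (k : Int), Dom_solve n k → Pre_solve n k → Spec_solve n k (solve n k)

-- ===== LEMMAS AND PROOFS =====

-- Reference semantics: one step of the process, and its f-fold iteration.
def step (n : Int) : Int :=
  if n % 200 = 0 then PySem.Int.floordiv n 200 else n * 1000 + 200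

def iterStep (n : Int) : Nat → Int
  | 0 => n
  | m + 1 => iterStep (step n) m

theorem solveFuel_eq_iter (f : Nat) (n : Int) :
    solveFuel n (↑f) f = iterStep n f := by
  induction f generalizing n with
  | zero => rfl
  | succ m ih =>
    have hne : ((m : Int) + 1) ≠ 0 := by positivity
    have hsub : ((m : Int)) + 1 - 1 = (m : Int) := by ring
    simp only [solveFuel, iterStep, Nat.cast_succ, hne, if_false, hsub, step]
    split <;> exact ih _

theorem iterStep_succ_outer (m : Nat) (n : Int) :
    iterStep n (m + 1) = step (iterStep n m) := by
  induction m generalizing n with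
  | zero => rfl
  | succ m ih => exact ih (step n)

-- the closed-form constant cf m = (5^m - 1)/4, via its recursion
def cf : Nat → Int
  | 0 => 0
  | m + 1 => 5 * cf m + 1

theorem pow5_sub_one (m : Nat) : (5:Int) ^ m - 1 = 4 * cf m := by
  induction m with
  | zero => decide
  | succ m ih => rw [pow_succ, cf]; omega

theorem floordiv_pow_cf (m : Nat) :
    PySem.Int.floordiv ((5:Int) ^ m - 1) 4 = cf m := by
  rw [pow5_sub_one, PySem.Int.floordiv_eq_ediv_of_pos (by norm_num)]
  exact Int.mul_ediv_cancel_left _ (by norm_num)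

theorem two_step (n : Int) (h : n % 200 ≠ 0) : step (step n) = 5 * n + 1 := by
  have h1 : step n = 200 * (5 * n + 1) := by
    simp only [step, if_neg h]; ring
  have h2 : ((200 * (5 * n + 1)) % 200 : Int) = 0 := Int.mul_emod_right _ _
  rw [h1]
  simp only [step, if_pos h2, PySem.Int.floordiv_eq_ediv_of_pos
    (show (0:Int) < 200 by norm_num)]
  exact Int.mul_ediv_cancel_left _ (by norm_num)

theorem not_dvd_five_succ (n : Int) : (5 * n + 1) % 200 ≠ 0 := by omega

-- closed form for an even number of steps from a non-multiple of 200
theorem iter_even (m : Nat) : ∀ n : Int, n % 200 ≠ 0 →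
    iterStep n (2 * m) = n * 5 ^ m + cf m ∧ (n * 5 ^ m + cf m) % 200 ≠ 0 := by
  induction m with
  | zero =>
    intro n h
    constructor
    · simp [iterStep, cf]
    · simpa [cf] using h
  | succ m ih =>
    intro n h
    have hiter : iterStep n (2 * (m + 1)) = iterStep (5 * n + 1) (2 * m) := by
      have he : 2 * (m + 1) = 2 * m + 1 + 1 := by ring
      rw [he]
      show iterStep (step (step n)) (2 * m) = _
      rw [two_step n h]
    obtain ⟨h1, h2⟩ := ih (5 * n + 1) (not_dvd_five_succ n)
    have hval : (5 * n + 1) * 5 ^ m + cf m = n * 5 ^ (m + 1) + cf (m + 1) := by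
      rw [cf, pow_succ]; linear_combination pow5_sub_one m
    exact ⟨by rw [hiter, h1, hval], by rw [← hval]; exact h2⟩

theorem altFinish_pair (n : Int) (f : Nat) :
    altFinish (n, ↑f) =
      if f % 2 = 1 then (n * 5 ^ (f / 2) + cf (f / 2)) * 1000 + 200
      else n * 5 ^ (f / 2) + cf (f / 2) := by
  have hd : PySem.Int.floordiv (↑f) 2 = ((f / 2 : Nat) : Int) := by
    exact_mod_cast PySem.Int.floordiv_natCast f 2
  have hm : PySem.Int.mod (↑f) 2 = ((f % 2 : Nat) : Int) := by
    exact_mod_cast PySem.Int.mod_natCast f 2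
  simp only [altFinish, hd, hm, Int.toNat_natCast, floordiv_pow_cf]
  by_cases h : f % 2 = 1
  · simp [h]
  · have h0 : f % 2 = 0 := by omega
    simp [h0]

theorem iter_notdvd (f : Nat) (n : Int) (h : n % 200 ≠ 0) :
    iterStep n f = altFinish (n, ↑f) := by
  rw [altFinish_pair]
  rcases Nat.even_or_odd f with ⟨t, rfl⟩ | ⟨t, rfl⟩
  · rw [if_neg (by omega : ¬ (t + t) % 2 = 1), (by omega : (t + t) / 2 = t),
        (by ring : t + t = 2 * t)]
    exact (iter_even t n h).1
  · obtain ⟨hv, hnd⟩ := iter_even t n h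
    rw [if_pos (by omega : (2 * t + 1) % 2 = 1), (by omega : (2 * t + 1) / 2 = t),
        iterStep_succ_outer, hv, step, if_neg hnd]

theorem altDivide_notdvd (f : Nat) (n : Int) (k : Int) (h : n % 200 ≠ 0) :
    altDivide n k f = (n, k) := by
  cases f with
  | zero => rfl
  | succ m => simp [altDivide, h]

-- main bridge: iterating f steps equals B's two-phase computation with fuel f, k = f
theorem iter_eq_alt (f : Nat) : ∀ n : Int, iterStep n f = solve_alt n ↑f := by
  induction f with
  | zero =>
    intro n
    show n = altFinish (altDivide n 0 (0:Int).toNat)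
    rw [show (0:Int).toNat = 0 from rfl]
    rw [show altDivide n 0 0 = (n, (0:Int)) from rfl]
    rw [show ((0:Int)) = ((0:Nat):Int) from rfl, altFinish_pair]
    simp [cf]
  | succ m ih =>
    intro n
    by_cases hd : n % 200 = 0
    · have hc : (0:Int) < (m:Int) + 1 ∧ n % 200 = 0 := ⟨by positivity, hd⟩
      have hs : ((m:Int)) + 1 - 1 = (m : Int) := by ring
      have hdiv : altDivide n (↑(m+1)) (m+1)
          = altDivide (PySem.Int.floordiv n 200) (↑m) m := by
        simp only [altDivide, Nat.cast_succ, hs]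
        rw [if_pos hc]
      have hlhs : iterStep n (m + 1) = iterStep (PySem.Int.floordiv n 200) m := by
        show iterStep (step n) m = _
        rw [show step n = PySem.Int.floordiv n 200 by simp [step, hd]]
      rw [hlhs, ih]
      show altFinish (altDivide _ (↑m) ((↑m:Int)).toNat)
          = altFinish (altDivide n (↑(m+1)) ((↑(m+1):Int)).toNat)
      rw [Int.toNat_natCast, Int.toNat_natCast, hdiv]
    · rw [iter_notdvd (m+1) n hd]
      show _ = altFinish (altDivide n (↑(m+1)) ((↑(m+1):Int)).toNat)
      rw [Int.toNat_natCast, altDivide_notdvd _ _ _ hd]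

-- ===== VERDICT (by name: the statement is the Claim_ definition above) =====
theorem solve_spec : Claim_equal_solve := by
  intro n k _ hk
  show solve n k = solve_alt n k
  obtain ⟨f, rfl⟩ := Int.eq_ofNat_of_zero_le hk
  unfold solve
  rcases Nat.eq_zero_or_pos f with h | h
  · subst h
    simpa using (iter_eq_alt 0 n)
  · have hne : ((f : Int)) ≠ 0 := by exact_mod_cast Nat.pos_iff_ne_zero.mp h
    simp only [hne, if_false, Int.toNat_natCast]
    rw [solveFuel_eq_iter, iter_eq_alt]
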